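-- pv_equiv track=rewrite | github.com/4vish/x-verba | packages/python/x_verba/scanner/engine.py | _has_authorisation_gate
-- ===== SOURCE A (Python) =====
-- def _has_authorisation_gate(lines: list, line_num: int) -> bool:
--     """Check for authorisation gates before irreversible actions."""
--     if not lines or line_num == 0:
--         return False
--     search_lines = lines[max(0, line_num - 20):line_num - 1]
--     gate_signals = [
--         "approve", "confirm", "authoris", "authoriz",
--         "permission", "has_permission", "can_",
--         "require_approval", "user_confirmed",
--         "human_authorised", "manual_approval",
--     ]
--     return any(
--         any(s in line.lower() for s in gate_signals)
--         for line in search_lines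
--     )
-- ===== SOURCE B (Python) =====
-- def _has_authorisation_gate(lines: list, line_num: int) -> bool:
--     """Check for authorisation gates before irreversible actions."""
--     if not lines or line_num == 0:
--         return False
--     gate_signals = [
--         "approve", "confirm", "authoris", "authoriz",
--         "permission", "has_permission", "can_",
--         "require_approval", "user_confirmed",
--         "human_authorised", "manual_approval",
--     ]
--     window = "\n".join(line.lower() for line in lines[max(0, line_num - 20):line_num - 1])
--     return any(s in window for s in gate_signals)
-- ===== Notes on version B (the rewrite author's own statement) =====
-- stated objective: alternative
-- what changed: Instead of testing all 11 keywords inside each line, B lowers the window lines once, joins them into a single newline-separated text, and searches that text once per keyword (exact because no keyword contains a newline).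
import Mathlib
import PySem

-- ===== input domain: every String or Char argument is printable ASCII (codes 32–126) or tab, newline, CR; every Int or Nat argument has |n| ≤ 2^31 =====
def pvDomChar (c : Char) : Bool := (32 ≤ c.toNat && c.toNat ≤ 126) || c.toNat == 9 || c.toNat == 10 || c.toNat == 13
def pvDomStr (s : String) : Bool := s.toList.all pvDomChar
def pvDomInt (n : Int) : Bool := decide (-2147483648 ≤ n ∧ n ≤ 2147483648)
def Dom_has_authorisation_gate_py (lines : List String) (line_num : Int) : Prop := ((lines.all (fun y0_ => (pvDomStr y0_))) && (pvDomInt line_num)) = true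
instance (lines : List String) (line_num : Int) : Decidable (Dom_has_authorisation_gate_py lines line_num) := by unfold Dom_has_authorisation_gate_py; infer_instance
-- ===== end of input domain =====

-- B replaces the per-line inner loop over the 11 keywords by one lowered window joined with "\n",
-- searched once per keyword (exact because no keyword contains a newline); objective: alternative.

-- ===== PORT A =====
def has_authorisation_gate_py (lines : List String) (line_num : Int) : Bool :=
  if lines = [] ∨ line_num = 0 then false
  else
    let search_lines := PySem.List.slice lines (some (max 0 (line_num - 20))) (some (line_num - 1))
    let gate_signals : List String :=
      ["approve", "confirm", "authoris", "authoriz",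
       "permission", "has_permission", "can_",
       "require_approval", "user_confirmed",
       "human_authorised", "manual_approval"]
    search_lines.any (fun line => gate_signals.any (fun s => PySem.Str.isIn s (PySem.Str.lower line)))

-- ===== PORT B =====
def has_authorisation_gate_py_alt (lines : List String) (line_num : Int) : Bool :=
  if lines = [] ∨ line_num = 0 then false
  else
    let gate_signals : List String :=
      ["approve", "confirm", "authoris", "authoriz",
       "permission", "has_permission", "can_",
       "require_approval", "user_confirmed",
       "human_authorised", "manual_approval"]
    let window := PySem.Str.join "\n"
      ((PySem.List.slice lines (some (max 0 (line_num - 20))) (some (line_num - 1))).map PySem.Str.lower)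
    gate_signals.any (fun s => PySem.Str.isIn s window)

-- ===== PRECONDITION & SPEC =====
def Spec_has_authorisation_gate_py (lines : List String) (line_num : Int) (out : Bool) : Prop := out = has_authorisation_gate_py_alt lines line_num
instance (lines : List String) (line_num : Int) (out : Bool) : Decidable (Spec_has_authorisation_gate_py lines line_num out) := by unfold Spec_has_authorisation_gate_py; infer_instance

-- ===== CLAIM (what is proved, stated in full; the proofs are below) =====
def Claim_equal_has_authorisation_gate_py : Prop := ∀ (lines : List String) (line_num : Int), Dom_has_authorisation_gate_py lines line_num → Spec_has_authorisation_gate_py lines line_num (has_authorisation_gate_py lines line_num)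

-- ===== LEMMAS AND PROOFS =====

-- a prefix of xs ++ c :: ys that avoids c is a prefix of xs
theorem pv_prefix_append_cons {t xs ys : List Char} {c : Char}
    (hc : c ∉ t) (h : t <+: xs ++ c :: ys) : t <+: xs := by
  induction t generalizing xs with
  | nil => exact List.nil_prefix
  | cons a t ih =>
    cases xs with
    | nil =>
      rcases h with ⟨r, hr⟩
      simp only [List.nil_append, List.cons_append, List.cons.injEq] at hr
      exact absurd hr.1.symm (by simp at hc; exact hc.1)
    | cons x xs =>
      rcases (List.cons_prefix_cons.mp h) with ⟨rfl, h'⟩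
      exact List.cons_prefix_cons.mpr ⟨rfl, ih (by simp at hc; exact hc.2) h'⟩

-- an infix of xs ++ c :: ys that is nonempty and avoids c lies in xs or in ys
theorem pv_infix_append_cons {t : List Char} (xs ys : List Char) {c : Char}
    (ht : t ≠ []) (hc : c ∉ t) : t <:+: xs ++ c :: ys ↔ t <:+: xs ∨ t <:+: ys := by
  constructor
  · intro h
    induction xs with
    | nil =>
      rcases List.infix_cons_iff.mp h with hp | hi
      · exact absurd (List.prefix_nil.mp (pv_prefix_append_cons hc hp)) ht
      · exact Or.inr hi
    | cons x xs ih =>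
      rcases List.infix_cons_iff.mp h with hp | hi
      · exact Or.inl (pv_prefix_append_cons hc hp).isInfix
      · rcases ih hi with h' | h'
        · exact Or.inl (List.infix_cons_iff.mpr (Or.inr h'))
        · exact Or.inr h'
  · rintro (h | h)
    · exact h.trans ⟨[], c :: ys, by simp⟩
    · exact h.trans ⟨xs ++ [c], [], by simp⟩

-- a nonempty needle without '\n' is in the '\n'-joined text iff it is in one of the parts
theorem pv_infix_join_newline (t : List Char) (ht : t ≠ []) (hc : '\n' ∉ t)
    (ps : List (List Char)) :
    t <:+: PySem.Chars.join ['\n'] ps ↔ ∃ p ∈ ps, t <:+: p := by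
  induction ps with
  | nil =>
    rw [PySem.Chars.join_nil]
    simp [List.infix_nil, ht]
  | cons p rest ih =>
    cases rest with
    | nil => rw [PySem.Chars.join_singleton]; simp
    | cons q rest' =>
      rw [PySem.Chars.join_cons_cons, List.append_assoc, List.singleton_append,
        pv_infix_append_cons p _ ht hc, ih]
      simp only [List.mem_cons]
      constructor
      · rintro (h | ⟨x, hx, h⟩)
        · exact ⟨p, Or.inl rfl, h⟩
        · exact ⟨x, Or.inr hx, h⟩
      · rintro ⟨x, (rfl | hx), h⟩
        · exact Or.inl h
        · exact Or.inr ⟨x, hx, h⟩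

-- one signal in the joined lowered window = that signal in some lowered line
theorem pv_sig_window (s : String) (hne : s.toList ≠ []) (hnl : '\n' ∉ s.toList)
    (search : List String) :
    PySem.Str.isIn s (PySem.Str.join "\n" (search.map PySem.Str.lower)) =
      search.any (fun line => PySem.Str.isIn s (PySem.Str.lower line)) := by
  rw [Bool.eq_iff_iff, PySem.Str.isIn_iff_infix, List.any_eq_true, PySem.Str.toList_join,
    List.map_map]
  have hsep : ("\n" : String).toList = ['\n'] := rfl
  rw [hsep, pv_infix_join_newline s.toList hne hnl]
  constructor
  · rintro ⟨p, hp, hinf⟩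
    rcases List.mem_map.mp hp with ⟨line, hl, rfl⟩
    exact ⟨line, hl, (PySem.Str.isIn_iff_infix _ _).mpr hinf⟩
  · rintro ⟨line, hl, h⟩
    exact ⟨(PySem.Str.lower line).toList, List.mem_map.mpr ⟨line, hl, rfl⟩,
      (PySem.Str.isIn_iff_infix _ _).mp h⟩

-- swapping the two `any`s and using pv_sig_window, for signals that are nonempty and newline-free
theorem pv_key (sigs search : List String)
    (hs : ∀ s ∈ sigs, s.toList ≠ [] ∧ '\n' ∉ s.toList) :
    search.any (fun line => sigs.any (fun s => PySem.Str.isIn s (PySem.Str.lower line))) =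
      sigs.any (fun s => PySem.Str.isIn s (PySem.Str.join "\n" (search.map PySem.Str.lower))) := by
  rw [Bool.eq_iff_iff]
  simp only [List.any_eq_true]
  constructor
  · rintro ⟨line, hl, s, hsm, hin⟩
    refine ⟨s, hsm, ?_⟩
    rw [pv_sig_window s (hs s hsm).1 (hs s hsm).2, List.any_eq_true]
    exact ⟨line, hl, hin⟩
  · rintro ⟨s, hsm, hin⟩
    rw [pv_sig_window s (hs s hsm).1 (hs s hsm).2, List.any_eq_true] at hin
    rcases hin with ⟨line, hl, h⟩
    exact ⟨line, hl, s, hsm, h⟩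

-- ===== VERDICT (by name: the statement is the Claim_ definition above) =====
theorem has_authorisation_gate_py_spec : Claim_equal_has_authorisation_gate_py := by
  intro lines line_num _
  unfold Spec_has_authorisation_gate_py has_authorisation_gate_py has_authorisation_gate_py_alt
  by_cases h : lines = [] ∨ line_num = 0
  · rw [if_pos h, if_pos h]
  · rw [if_neg h, if_neg h]
    exact pv_key _ _ (by decide)
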